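-- pv_equiv track=rewrite | github.com/jhalucky/RWA-Scoring | backend/scorer.py | _score_by_presence
-- ===== SOURCE A (Python) =====
-- from typing import Dict, Any, Tuple, List
--
-- def _score_by_presence(text: str, keywords: Dict[str,int]) -> Tuple[int, Dict[str,int]]:
--     score = 0
--     found = {}
--     t = text.lower()
--     for k, w in keywords.items():
--         if k in t:
--             score += w
--             found[k] = 1
--         else:
--             found[k] = 0
--     return score, found
-- ===== SOURCE B (Python) =====
-- def _score_by_presence(text, keywords):
--     t = text.lower()
--     hits = set()
--     for i in range(len(t) + 1):
--         for k in keywords: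
--             if k not in hits and t.startswith(k, i):
--                 hits.add(k)
--     score = sum(w for k, w in keywords.items() if k in hits)
--     found = {k: (1 if k in hits else 0) for k in keywords}
--     return score, found
-- ===== Notes on version B (the rewrite author's own statement) =====
-- stated objective: alternative
-- what changed: keyword-major repeated substring searches (k in t per keyword) are replaced by a single text-major scan: one pass over all start positions checks each not-yet-found keyword with startswith, collecting a hit set from which the score and the presence flags are then derived
import Mathlib
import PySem

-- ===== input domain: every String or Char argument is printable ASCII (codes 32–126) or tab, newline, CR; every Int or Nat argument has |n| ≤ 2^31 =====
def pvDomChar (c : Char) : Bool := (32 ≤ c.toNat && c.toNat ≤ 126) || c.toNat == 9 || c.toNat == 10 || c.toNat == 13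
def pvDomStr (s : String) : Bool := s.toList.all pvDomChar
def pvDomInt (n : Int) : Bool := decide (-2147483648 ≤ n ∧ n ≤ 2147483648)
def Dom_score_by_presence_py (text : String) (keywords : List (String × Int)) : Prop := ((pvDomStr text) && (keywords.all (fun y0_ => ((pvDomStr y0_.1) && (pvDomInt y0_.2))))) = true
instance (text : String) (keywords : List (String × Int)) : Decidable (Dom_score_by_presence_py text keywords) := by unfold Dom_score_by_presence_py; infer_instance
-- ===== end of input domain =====

-- B replaces per-keyword substring searches by a single text-major scan over start positions
-- collecting a hit set (alternative decomposition, same asymptotic cost).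


-- ===== PORT A =====
-- literal transliteration of _score_by_presence: one loop over keywords.items(),
-- accumulating (score, found) where found is a dict; 'k in t' is PySem.Str.isIn.
def score_by_presence_py (text : String) (keywords : List (String × Int)) : Int × (List (String × Int)) :=
  let t := PySem.Str.lower text
  let res := keywords.foldl
    (fun (acc : Int × PySem.Dict String Int) kw =>
      if PySem.Str.isIn kw.1 t then (acc.1 + kw.2, acc.2.insert kw.1 1)
      else (acc.1, acc.2.insert kw.1 0))
    (0, PySem.Dict.empty)
  (res.1, res.2.items)

-- ===== PORT B =====
-- transliteration of Source B: scan every start position i of the lowered text once,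
-- adding each not-yet-found keyword that starts there to a hit set; then derive
-- score and flags from the set. 't.startswith(k, i)' with 0 ≤ i ≤ len(t) is exactly
-- PySem.Chars.startswith on (t.drop i).
def score_by_presence_py_alt (text : String) (keywords : List (String × Int)) : Int × (List (String × Int)) :=
  let t := PySem.Chars.lower text.toList
  let hits := (PySem.List.pyRange 0 ((t.length : Int) + 1) 1).foldl
    (fun (h : PySem.Set String) i =>
      keywords.foldl
        (fun (h : PySem.Set String) kw =>
          if !PySem.Set.contains h kw.1 && PySem.Chars.startswith (t.drop i.toNat) kw.1.toList
          then PySem.Set.add h kw.1 else h) h)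
    PySem.Set.empty
  let score := keywords.foldl (fun s kw => if PySem.Set.contains hits kw.1 then s + kw.2 else s) 0
  let found := keywords.foldl
    (fun (d : PySem.Dict String Int) kw => d.insert kw.1 (if PySem.Set.contains hits kw.1 then 1 else 0))
    PySem.Dict.empty
  (score, found.items)

-- ===== PRECONDITION & SPEC =====
-- Pre_ excludes keyword lists with duplicate keys: the Python argument is a dict, whose keys are
-- unique; an association list with a repeated key has no dict counterpart (dict() collapses it
-- before A ever sees it), so nothing is claimed there.
def Pre_score_by_presence_py (text : String) (keywords : List (String × Int)) : Prop :=
  (keywords.map (·.1)).Nodup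
instance (text : String) (keywords : List (String × Int)) : Decidable (Pre_score_by_presence_py text keywords) := by unfold Pre_score_by_presence_py; infer_instance

def pvWitness_score_by_presence_py : String × (List (String × Int)) :=
  ("Token: GOLD bar", [("gold", 5), ("silver", 3)])

def Spec_score_by_presence_py (text : String) (keywords : List (String × Int)) (out : Int × (List (String × Int))) : Prop := out = score_by_presence_py_alt text keywords
instance (text : String) (keywords : List (String × Int)) (out : Int × (List (String × Int))) : Decidable (Spec_score_by_presence_py text keywords out) := by unfold Spec_score_by_presence_py; infer_instance

-- ===== CLAIM (what is proved, stated in full; the proofs are below) =====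
def Claim_equal_score_by_presence_py : Prop := ∀ (text : String) (keywords : List (String × Int)), Dom_score_by_presence_py text keywords → Pre_score_by_presence_py text keywords → Spec_score_by_presence_py text keywords (score_by_presence_py text keywords)

-- ===== LEMMAS AND PROOFS =====

-- membership after one step of B's inner loop
theorem pv_step_mem (t : List Char) (a : String × Int) (h : PySem.Set String) (y : String) :
    (y ∈ (if !PySem.Set.contains h a.1 && PySem.Chars.startswith t a.1.toList
          then PySem.Set.add h a.1 else h)) ↔
      y ∈ h ∨ (y = a.1 ∧ PySem.Chars.startswith t a.1.toList = true) := by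
  by_cases hcond : (!PySem.Set.contains h a.1 && PySem.Chars.startswith t a.1.toList) = true
  · rw [if_pos hcond, PySem.Set.mem_add]
    simp only [Bool.and_eq_true] at hcond
    obtain ⟨-, hsw⟩ := hcond
    constructor
    · rintro (hy | hy)
      · exact Or.inl hy
      · exact Or.inr ⟨hy, hsw⟩
    · rintro (hy | ⟨hy, -⟩)
      · exact Or.inl hy
      · exact Or.inr hy
  · rw [if_neg hcond]
    constructor
    · exact Or.inl
    · rintro (hy | ⟨hy, hsw⟩)
      · exact hy
      · -- the guard failed although startswith holds, so a.1 is already in h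
        rcases Bool.eq_false_or_eq_true (PySem.Set.contains h a.1) with hc | hc
        · exact hy ▸ (PySem.Set.contains_iff h a.1).1 hc
        · have hnot : a.1 ∉ h := fun hm => by
            rw [(PySem.Set.contains_iff h a.1).2 hm] at hc; cases hc
          exact absurd (by simp [hsw, hnot]) hcond

-- membership in the inner (per-position) fold of B
theorem pv_inner_mem (t : List Char) (kws : List (String × Int)) (h : PySem.Set String) (k : String) :
    (k ∈ kws.foldl
        (fun (h : PySem.Set String) kw =>
          if !PySem.Set.contains h kw.1 && PySem.Chars.startswith t kw.1.toList
          then PySem.Set.add h kw.1 else h) h) ↔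
      k ∈ h ∨ ((∃ w, (k, w) ∈ kws) ∧ PySem.Chars.startswith t k.toList = true) := by
  induction kws generalizing h with
  | nil => simp
  | cons a tl ih =>
    simp only [List.foldl_cons, ih, pv_step_mem]
    constructor
    · rintro ((hk | ⟨rfl, hsw⟩) | ⟨⟨w, hw⟩, hsw⟩)
      · exact Or.inl hk
      · exact Or.inr ⟨⟨a.2, by simp⟩, hsw⟩
      · exact Or.inr ⟨⟨w, List.mem_cons_of_mem _ hw⟩, hsw⟩
    · rintro (hk | ⟨⟨w, hw⟩, hsw⟩)
      · exact Or.inl (Or.inl hk)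
      · rcases List.mem_cons.1 hw with hw | hw
        · have h1 : k = a.1 := congrArg Prod.fst hw
          exact Or.inl (Or.inr ⟨h1, h1 ▸ hsw⟩)
        · exact Or.inr ⟨⟨w, hw⟩, hsw⟩

-- membership in the outer fold of B over an arbitrary list of positions
theorem pv_outer_mem (t : List Char) (kws : List (String × Int)) (L : List Int)
    (h : PySem.Set String) (k : String) :
    (k ∈ L.foldl
        (fun (h : PySem.Set String) i =>
          kws.foldl
            (fun (h : PySem.Set String) kw =>
              if !PySem.Set.contains h kw.1 && PySem.Chars.startswith (t.drop i.toNat) kw.1.toList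
              then PySem.Set.add h kw.1 else h) h) h) ↔
      k ∈ h ∨ ((∃ w, (k, w) ∈ kws) ∧ ∃ i ∈ L, PySem.Chars.startswith (t.drop i.toNat) k.toList = true) := by
  induction L generalizing h with
  | nil => simp
  | cons i tl ih =>
    simp only [List.foldl_cons, ih, pv_inner_mem]
    constructor
    · rintro ((hk | ⟨hw, hs⟩) | ⟨hw, i', hi', hs⟩)
      · exact Or.inl hk
      · exact Or.inr ⟨hw, i, List.mem_cons_self .., hs⟩
      · exact Or.inr ⟨hw, i', List.mem_cons_of_mem _ hi', hs⟩
    · rintro (hk | ⟨hw, i', hi', hs⟩)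
      · exact Or.inl (Or.inl hk)
      · rcases List.mem_cons.1 hi' with rfl | hi'
        · exact Or.inl (Or.inr ⟨hw, hs⟩)
        · exact Or.inr ⟨hw, i', hi', hs⟩

-- ∃ start position in range(0, len(t)+1) with startswith  ↔  substring containment
theorem pv_exists_pos_iff_isIn (t : List Char) (k : String) :
    (∃ i ∈ PySem.List.pyRange 0 ((t.length : Int) + 1) 1,
        PySem.Chars.startswith (t.drop i.toNat) k.toList = true) ↔
      PySem.Chars.isIn k.toList t = true := by
  rw [← PySem.Chars.exists_prefix_drop_iff_isIn]
  constructor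
  · rintro ⟨i, _, hs⟩
    exact ⟨i.toNat, (PySem.Chars.startswith_iff _ _).1 hs⟩
  · rintro ⟨j, hj⟩
    by_cases hjn : j ≤ t.length
    · refine ⟨(j : Int), ?_, ?_⟩
      · rw [PySem.List.mem_pyRange_one]
        constructor <;> omega
      · simpa using (PySem.Chars.startswith_iff _ _).2 hj
    · -- j past the end: t.drop j = [] = t.drop t.length
      refine ⟨(t.length : Int), ?_, ?_⟩
      · rw [PySem.List.mem_pyRange_one]
        constructor <;> omega
      · have h1 : t.drop j = [] := List.drop_eq_nil_of_le (by omega)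
        have h2 : t.drop t.length = [] := List.drop_eq_nil_of_le (le_refl _)
        rw [h1] at hj
        refine (PySem.Chars.startswith_iff _ _).2 ?_
        simp only [Int.toNat_natCast, h2]
        exact hj

-- for every keyword in the list, B's hit set agrees with A's 'k in t'
theorem pv_hits_eq (text : String) (keywords : List (String × Int)) (kw : String × Int)
    (hkw : kw ∈ keywords) :
    PySem.Set.contains
      ((PySem.List.pyRange 0 (((PySem.Chars.lower text.toList).length : Int) + 1) 1).foldl
        (fun (h : PySem.Set String) i =>
          keywords.foldl
            (fun (h : PySem.Set String) kw =>
              if !PySem.Set.contains h kw.1 &&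
                  PySem.Chars.startswith ((PySem.Chars.lower text.toList).drop i.toNat) kw.1.toList
              then PySem.Set.add h kw.1 else h) h)
        (PySem.Set.empty : PySem.Set String)) kw.1
      = PySem.Str.isIn kw.1 (PySem.Str.lower text) := by
  set t := PySem.Chars.lower text.toList with ht
  have hmem :
      (kw.1 ∈ (PySem.List.pyRange 0 ((t.length : Int) + 1) 1).foldl
        (fun (h : PySem.Set String) i =>
          keywords.foldl
            (fun (h : PySem.Set String) kw =>
              if !PySem.Set.contains h kw.1 && PySem.Chars.startswith (t.drop i.toNat) kw.1.toList
              then PySem.Set.add h kw.1 else h) h) (PySem.Set.empty : PySem.Set String)) ↔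
        PySem.Chars.isIn kw.1.toList t = true := by
    rw [pv_outer_mem]
    simp only [pv_exists_pos_iff_isIn]
    constructor
    · rintro (hk | ⟨_, hs⟩)
      · exact absurd hk (by simp [PySem.Set.empty])
      · exact hs
    · intro hs
      exact Or.inr ⟨⟨kw.2, by simpa using hkw⟩, hs⟩
  have hstr : PySem.Str.isIn kw.1 (PySem.Str.lower text)
      = PySem.Chars.isIn kw.1.toList t := by
    simp [ht, pysem]
  rw [hstr]
  exact Bool.eq_iff_iff.mpr ((PySem.Set.contains_iff _ _).trans hmem)

-- A's paired fold splits into a score fold and a dict fold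
theorem pv_foldA_split (t : String) (kws : List (String × Int)) (s0 : Int)
    (d0 : PySem.Dict String Int) :
    kws.foldl
      (fun (acc : Int × PySem.Dict String Int) kw =>
        if PySem.Str.isIn kw.1 t then (acc.1 + kw.2, acc.2.insert kw.1 1)
        else (acc.1, acc.2.insert kw.1 0)) (s0, d0)
      = (kws.foldl (fun s kw => if PySem.Str.isIn kw.1 t then s + kw.2 else s) s0,
         kws.foldl (fun (d : PySem.Dict String Int) kw =>
           d.insert kw.1 (if PySem.Str.isIn kw.1 t then 1 else 0)) d0) := by
  induction kws generalizing s0 d0 with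
  | nil => rfl
  | cons a tl ih =>
    simp only [List.foldl_cons]
    by_cases hc : PySem.Str.isIn a.1 t = true
    · rw [if_pos hc, if_pos hc, if_pos hc, ih]
    · rw [if_neg hc, if_neg hc, if_neg hc, ih]

-- ===== VERDICT (by name: the statement is the Claim_ definition above) =====
theorem score_by_presence_py_spec : Claim_equal_score_by_presence_py := by
  intro text keywords _hdom _hpre
  unfold Spec_score_by_presence_py
  simp only [score_by_presence_py, score_by_presence_py_alt]
  rw [pv_foldA_split]
  have hsc := PySem.List.foldl_congr_mem
    (l := keywords) (init := (0 : Int))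
    (f := fun s kw => if PySem.Str.isIn kw.1 (PySem.Str.lower text) then s + kw.2 else s)
    (g := fun s kw =>
      if PySem.Set.contains
          ((PySem.List.pyRange 0 (((PySem.Chars.lower text.toList).length : Int) + 1) 1).foldl
            (fun (h : PySem.Set String) i =>
              keywords.foldl
                (fun (h : PySem.Set String) kw =>
                  if !PySem.Set.contains h kw.1 &&
                      PySem.Chars.startswith ((PySem.Chars.lower text.toList).drop i.toNat) kw.1.toList
                  then PySem.Set.add h kw.1 else h) h)
            (PySem.Set.empty : PySem.Set String)) kw.1
      then s + kw.2 else s)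
    (by intro acc kw hkw; dsimp only; rw [pv_hits_eq text keywords kw hkw])
  have hdc := PySem.List.foldl_congr_mem
    (l := keywords) (init := (PySem.Dict.empty : PySem.Dict String Int))
    (f := fun (d : PySem.Dict String Int) kw =>
      d.insert kw.1 (if PySem.Str.isIn kw.1 (PySem.Str.lower text) then 1 else 0))
    (g := fun (d : PySem.Dict String Int) kw =>
      d.insert kw.1
        (if PySem.Set.contains
            ((PySem.List.pyRange 0 (((PySem.Chars.lower text.toList).length : Int) + 1) 1).foldl
              (fun (h : PySem.Set String) i =>
                keywords.foldl
                  (fun (h : PySem.Set String) kw =>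
                    if !PySem.Set.contains h kw.1 &&
                        PySem.Chars.startswith ((PySem.Chars.lower text.toList).drop i.toNat) kw.1.toList
                    then PySem.Set.add h kw.1 else h) h)
              (PySem.Set.empty : PySem.Set String)) kw.1
        then 1 else 0))
    (by intro acc kw hkw; dsimp only; rw [pv_hits_eq text keywords kw hkw])
  rw [hsc, hdc]
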